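-- pv_equiv track=rewrite | github.com/Yolwoocle/2024 | ex1.py | le_plus_grand_saut
-- ===== SOURCE A (Python) =====
-- from typing import List
--
-- def le_plus_grand_saut(n: int, differences: List[int]) -> None:
--     """
--     :param n: le nombre de branches de l'arbre moins 1
--     :param differences: la liste des différences en hauteur des branches consécutives
--     """
--     # TODO Afficher le plus grand saut que devra effectuer Höder pour atteindre
--     # la branche la plus haute de l'Yggdrasil.
--     max_hauteur = differences[0]
--     max_hauteur_idx = 0
--     hauteur = 0
--     for i in range(n):
--         diff = differences[i]
--
--         hauteur += diff
--         if hauteur > max_hauteur: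
--             max_hauteur = hauteur
--             max_hauteur_idx = i
--
--     return max(differences[:max_hauteur_idx+1])
-- ===== SOURCE B (Python) =====
-- def le_plus_grand_saut(n, differences):
--     # Single pass: track running height, best height, running max difference,
--     # and snapshot the running max whenever a new best height is reached
--     # (no slice and no second max pass).
--     hauteur = 0
--     max_hauteur = differences[0]
--     max_diff = differences[0]
--     best = differences[0]
--     for i in range(n):
--         d = differences[i]
--         hauteur += d
--         if d > max_diff:
--             max_diff = d
--         if hauteur > max_hauteur:
--             max_hauteur = hauteur
--             best = max_diff
--     return best
-- ===== Notes on version B (the rewrite author's own statement) =====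
-- stated objective: alternative
-- what changed: Fused into one pass: instead of recording the argmax index and then taking max over a prefix slice, B maintains a running max of differences and snapshots it whenever a new maximum height is reached, eliminating the slice and the second max pass.
import Mathlib
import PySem

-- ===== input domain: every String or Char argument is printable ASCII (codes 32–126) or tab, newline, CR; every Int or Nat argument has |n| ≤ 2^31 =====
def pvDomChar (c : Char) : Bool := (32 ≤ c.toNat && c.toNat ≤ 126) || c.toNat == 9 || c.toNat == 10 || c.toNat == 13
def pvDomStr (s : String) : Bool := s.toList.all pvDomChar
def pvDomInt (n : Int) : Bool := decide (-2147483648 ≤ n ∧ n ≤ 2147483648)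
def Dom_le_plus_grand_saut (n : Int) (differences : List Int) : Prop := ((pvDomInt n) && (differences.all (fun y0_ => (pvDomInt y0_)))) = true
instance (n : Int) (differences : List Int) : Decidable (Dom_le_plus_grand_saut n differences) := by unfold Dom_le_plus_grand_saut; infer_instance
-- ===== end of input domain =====

-- B fuses A's argmax loop and prefix-slice max into a single pass with a snapshotted running max (alternative decomposition, same cost).

-- ===== PORT A =====
-- state = (max_hauteur, max_hauteur_idx, hauteur)
def le_plus_grand_saut (n : Int) (differences : List Int) : Int :=
  let s := (PySem.List.pyRange 0 n 1).foldl (fun (st : Int × Int × Int) i =>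
      let diff := PySem.List.pyGetD differences i 0
      let h := st.2.2 + diff
      if h > st.1 then (h, i, h) else (st.1, st.2.1, h))
    (PySem.List.pyGetD differences 0 0, 0, 0)
  (PySem.List.max? (PySem.List.slice differences none (some (s.2.1 + 1))) (fun y => y)).getD 0

-- ===== PORT B =====
-- state = (hauteur, max_hauteur, max_diff, best)
def le_plus_grand_saut_alt (n : Int) (differences : List Int) : Int :=
  let d0 := PySem.List.pyGetD differences 0 0
  let s := (PySem.List.pyRange 0 n 1).foldl (fun (st : Int × Int × Int × Int) i =>
      let d := PySem.List.pyGetD differences i 0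
      let h := st.1 + d
      let md := if d > st.2.2.1 then d else st.2.2.1
      if h > st.2.1 then (h, h, md, md) else (h, st.2.1, md, st.2.2.2))
    (0, d0, d0, d0)
  s.2.2.2

-- ===== PRECONDITION & SPEC =====
-- Pre_ excludes exactly the inputs where Python A raises IndexError: an empty list
-- (differences[0]) or n exceeding the list length (differences[i] in the loop).
def Pre_le_plus_grand_saut (n : Int) (differences : List Int) : Prop :=
  differences ≠ [] ∧ n ≤ (differences.length : Int)
instance (n : Int) (differences : List Int) : Decidable (Pre_le_plus_grand_saut n differences) := by unfold Pre_le_plus_grand_saut; infer_instance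
def pvWitness_le_plus_grand_saut : Int × List Int := (3, [2, -1, 4])

def Spec_le_plus_grand_saut (n : Int) (differences : List Int) (out : Int) : Prop := out = le_plus_grand_saut_alt n differences
instance (n : Int) (differences : List Int) (out : Int) : Decidable (Spec_le_plus_grand_saut n differences out) := by unfold Spec_le_plus_grand_saut; infer_instance

-- ===== CLAIM (what is proved, stated in full; the proofs are below) =====
def Claim_equal_le_plus_grand_saut : Prop := ∀ (n : Int) (differences : List Int), Dom_le_plus_grand_saut n differences → Pre_le_plus_grand_saut n differences → Spec_le_plus_grand_saut n differences (le_plus_grand_saut n differences)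

-- ===== LEMMAS AND PROOFS =====

-- max of the first (k+1) elements of x :: t
def pvP (x : Int) (t : List Int) (k : Nat) : Int := (t.take k).foldl max x

lemma pvP_succ (x : Int) (t : List Int) (k : Nat) (hk : k < t.length) :
    pvP x t (k + 1) = max (pvP x t k) t[k] := by
  have h : t.take (k + 1) = t.take k ++ [t[k]] := by
    rw [List.take_add_one, List.getElem?_eq_getElem hk]; rfl
  rw [pvP, pvP, h, List.foldl_append]; rfl

-- the fold step functions, named so the invariant lemma can speak about them
def pvStepA (differences : List Int) (st : Int × Int × Int) (i : Int) : Int × Int × Int :=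
  let diff := PySem.List.pyGetD differences i 0
  let h := st.2.2 + diff
  if h > st.1 then (h, i, h) else (st.1, st.2.1, h)

def pvStepB (differences : List Int) (st : Int × Int × Int × Int) (i : Int) : Int × Int × Int × Int :=
  let d := PySem.List.pyGetD differences i 0
  let h := st.1 + d
  let md := if d > st.2.2.1 then d else st.2.2.1
  if h > st.2.1 then (h, h, md, md) else (h, st.2.1, md, st.2.2.2)

-- main loop invariant, by induction on the number of remaining iterations
lemma pv_loop (x : Int) (t : List Int) (n : Int) (hn : n ≤ (x :: t).length) :
    ∀ (m : Nat) (a : Int), 0 ≤ a → a + m = n →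
    ∀ (stA : Int × Int × Int) (stB : Int × Int × Int × Int),
      stA.2.2 = stB.1 → stA.1 = stB.2.1 → 0 ≤ stA.2.1 →
      stA.2.1.toNat + 1 ≤ max a.toNat 1 →
      stB.2.2.2 = pvP x t stA.2.1.toNat →
      stB.2.2.1 = pvP x t (max a.toNat 1 - 1) →
      (((PySem.List.pyRange a n 1).foldl (pvStepB (x :: t)) stB).2.2.2
        = pvP x t (((PySem.List.pyRange a n 1).foldl (pvStepA (x :: t)) stA).2.1).toNat)
      ∧ 0 ≤ ((PySem.List.pyRange a n 1).foldl (pvStepA (x :: t)) stA).2.1 := by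
  intro m
  induction m with
  | zero =>
    intro a ha hm stA stB h1 h2 hi0 hib hbest hmd
    have : ¬ a < n := by omega
    rw [PySem.List.pyRange_one_eq_nil (by omega)]
    exact ⟨by simp [hbest], hi0⟩
  | succ m ih =>
    intro a ha hm stA stB h1 h2 hi0 hib hbest hmd
    have han : a < n := by omega
    rw [PySem.List.pyRange_one_cons han]
    simp only [List.foldl_cons]
    -- the common element
    have halen : a.toNat < (x :: t).length := by
      simp only [List.length_cons] at hn ⊢; omega
    have hget : PySem.List.pyGetD (x :: t) a 0 = (x :: t)[a.toNat] :=
      PySem.List.pyGetD_eq_getElem _ _ ha (by simpa using lt_of_lt_of_le han hn)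
    -- new running max of differences equals pvP x t a.toNat
    have hmd' : (if PySem.List.pyGetD (x :: t) a 0 > stB.2.2.1 then PySem.List.pyGetD (x :: t) a 0 else stB.2.2.1)
        = pvP x t a.toNat := by
      rcases Nat.eq_zero_or_pos a.toNat with h0 | hpos
      · -- a = 0 : element is x, md was pvP 0 = x
        have hx : (x :: t)[a.toNat] = x := by simp [h0]
        have hmax : max a.toNat 1 - 1 = 0 := by omega
        rw [hget, hx, hmd, hmax, h0]
        simp [pvP]
      · -- a ≥ 1 : element is t[a.toNat - 1], pvP_succ
        obtain ⟨k, hk⟩ := Nat.exists_eq_succ_of_ne_zero (by omega : a.toNat ≠ 0)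
        have hlt : k < t.length := by simp only [List.length_cons] at halen; omega
        have hel : (x :: t)[a.toNat] = t[k] := by simp [hk]
        have hmax : max a.toNat 1 - 1 = k := by omega
        rw [hget, hel, hmd, hmax, hk, pvP_succ x t k hlt]
        rcases le_or_gt t[k] (pvP x t k) with hle | hgt
        · rw [if_neg (not_lt.mpr hle), max_eq_left hle]
        · rw [if_pos hgt, max_eq_right (le_of_lt hgt)]
    -- case split on the height update (same condition for both programs)
    simp only [pvStepA, pvStepB, h1, h2]
    by_cases hc : stB.1 + PySem.List.pyGetD (x :: t) a 0 > stB.2.1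
    · simp only [hc, if_pos]
      refine ih (a + 1) (by omega) (by omega) _ _ rfl rfl ha ?_ ?_ ?_
      · dsimp only
        omega
      · simpa using hmd'
      · have : max (a + 1).toNat 1 - 1 = a.toNat := by omega
        rw [this]; simpa using hmd'
    · simp only [hc, if_false]
      refine ih (a + 1) (by omega) (by omega) _ _ rfl rfl hi0 (by dsimp only; omega) hbest ?_
      have : max (a + 1).toNat 1 - 1 = a.toNat := by omega
      rw [this]; exact hmd'

-- ===== VERDICT (by name: the statement is the Claim_ definition above) =====
theorem le_plus_grand_saut_spec : Claim_equal_le_plus_grand_saut := by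
  intro n differences _ hpre
  obtain ⟨hne, hn⟩ := hpre
  obtain ⟨x, t, rfl⟩ : ∃ x t, differences = x :: t := by
    cases differences with
    | nil => exact absurd rfl hne
    | cons x t => exact ⟨x, t, rfl⟩
  unfold Spec_le_plus_grand_saut le_plus_grand_saut le_plus_grand_saut_alt
  simp only []
  rcases le_or_gt n 0 with hn0 | hn0
  · -- empty range: A returns max((x::t)[:1]) = x, B returns d0 = x
    rw [PySem.List.pyRange_one_eq_nil hn0]
    simp only [List.foldl_nil]
    have hsl : PySem.List.slice (x :: t) none (some ((0:Int) + 1)) = [x] := by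
      rw [PySem.List.slice_to _ (by omega)]; rfl
    rw [hsl, PySem.List.max?_id_cons]
    simp [PySem.List.pyGetD_zero_cons]
  · have key := pv_loop x t n hn n.toNat 0 (by omega) (by omega)
      (PySem.List.pyGetD (x :: t) 0 0, 0, 0)
      (0, PySem.List.pyGetD (x :: t) 0 0, PySem.List.pyGetD (x :: t) 0 0, PySem.List.pyGetD (x :: t) 0 0)
      rfl rfl (by simp) (by simp)
      (by simp [pvP, PySem.List.pyGetD_zero_cons])
      (by simp [pvP, PySem.List.pyGetD_zero_cons])
    obtain ⟨hfin, hpos⟩ := key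
    -- identify the folds in the goal with pvStepA/pvStepB
    have eA : (PySem.List.pyRange 0 n 1).foldl (fun (st : Int × Int × Int) i =>
        let diff := PySem.List.pyGetD (x :: t) i 0
        let h := st.2.2 + diff
        if h > st.1 then (h, i, h) else (st.1, st.2.1, h))
        (PySem.List.pyGetD (x :: t) 0 0, 0, 0)
        = (PySem.List.pyRange 0 n 1).foldl (pvStepA (x :: t)) (PySem.List.pyGetD (x :: t) 0 0, 0, 0) := rfl
    have eB : (PySem.List.pyRange 0 n 1).foldl (fun (st : Int × Int × Int × Int) i =>
        let d := PySem.List.pyGetD (x :: t) i 0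
        let h := st.1 + d
        let md := if d > st.2.2.1 then d else st.2.2.1
        if h > st.2.1 then (h, h, md, md) else (h, st.2.1, md, st.2.2.2))
        (0, PySem.List.pyGetD (x :: t) 0 0, PySem.List.pyGetD (x :: t) 0 0, PySem.List.pyGetD (x :: t) 0 0)
        = (PySem.List.pyRange 0 n 1).foldl (pvStepB (x :: t)) (0, PySem.List.pyGetD (x :: t) 0 0, PySem.List.pyGetD (x :: t) 0 0, PySem.List.pyGetD (x :: t) 0 0) := rfl
    rw [eA, eB, hfin]
    -- A's final slice-max equals pvP at the final index
    set idx := ((PySem.List.pyRange 0 n 1).foldl (pvStepA (x :: t)) (PySem.List.pyGetD (x :: t) 0 0, 0, 0)).2.1 with hidx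
    have hsl : PySem.List.slice (x :: t) none (some (idx + 1)) = (x :: t).take (idx + 1).toNat :=
      PySem.List.slice_to _ (by omega)
    have htk : (x :: t).take (idx + 1).toNat = x :: t.take idx.toNat := by
      have : (idx + 1).toNat = idx.toNat + 1 := by omega
      rw [this]; simp
    rw [hsl, htk]
    rw [PySem.List.max?_id_cons]
    simp [pvP]
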